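-- pv_equiv track=rewrite | github.com/TimothySjiang/leetcodepy | Love_Nines.py | loveNine
-- ===== SOURCE A (Python) =====
-- def loveNine(N):
--     count = 0
--     while N > 0:
--         N -= 9
--         count += 1
--         if not N % 10:
--             break
--     return count if N >= 0 else -1
-- ===== SOURCE B (Python) =====
-- def loveNine(N):
--     if N <= 0:
--         return 0 if N == 0 else -1
--     d = N % 10
--     k = 10 - d if d else 10
--     return k if N >= 9 * k else -1
-- ===== Notes on version B (the rewrite author's own statement) =====
-- stated objective: alternative
-- what changed: Replaced the subtract-9 loop with direct arithmetic: the number of steps to a trailing zero is k = 10 - N%10 (or 10 when N%10 == 0), and the loop succeeds exactly when N >= 9*k; no loop remains.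
import Mathlib
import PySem

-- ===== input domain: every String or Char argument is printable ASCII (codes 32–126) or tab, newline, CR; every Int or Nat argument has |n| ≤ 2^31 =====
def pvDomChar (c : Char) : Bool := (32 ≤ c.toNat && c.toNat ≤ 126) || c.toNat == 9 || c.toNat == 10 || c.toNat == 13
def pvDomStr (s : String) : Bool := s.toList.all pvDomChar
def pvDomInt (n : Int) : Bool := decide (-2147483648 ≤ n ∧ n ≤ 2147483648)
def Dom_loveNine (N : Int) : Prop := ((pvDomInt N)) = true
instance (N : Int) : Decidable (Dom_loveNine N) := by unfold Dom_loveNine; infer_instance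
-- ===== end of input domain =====

-- B replaces A's subtract-9 loop with an O(1) closed form on the last digit.
-- ===== PORT A =====
def loveNineLoop (N count : Int) : Int × Int :=
  if h : 0 < N then
    let N' := N - 9
    let c' := count + 1
    if PySem.Int.mod N' 10 = 0 then (N', c')
    else loveNineLoop N' c'
  else (N, count)
termination_by N.toNat
decreasing_by
  have : 0 < N := h
  omega

def loveNine (N : Int) : Int :=
  let r := loveNineLoop N 0
  if 0 ≤ r.1 then r.2 else -1

-- ===== PORT B =====
def loveNine_alt (N : Int) : Int :=
  if N ≤ 0 then (if N = 0 then 0 else -1)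
  else
    let d := PySem.Int.mod N 10
    let k := if d ≠ 0 then 10 - d else 10
    if 9 * k ≤ N then k else -1

-- ===== PRECONDITION & SPEC =====
def Spec_loveNine (N : Int) (out : Int) : Prop := out = loveNine_alt N
instance (N : Int) (out : Int) : Decidable (Spec_loveNine N out) := by unfold Spec_loveNine; infer_instance

-- ===== CLAIM (what is proved, stated in full; the proofs are below) =====
def Claim_equal_loveNine : Prop := ∀ (N : Int), Dom_loveNine N → Spec_loveNine N (loveNine N)

-- ===== LEMMAS AND PROOFS =====
theorem pymod_eq (a : Int) : PySem.Int.mod a 10 = a % 10 :=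
  PySem.Int.mod_eq_emod_of_pos (by norm_num)

-- characterization of the loop's final answer for positive N
theorem loop_eval : ∀ (n : Nat) (N c : Int), N.toNat = n → 0 < N →
    (if 0 ≤ (loveNineLoop N c).1 then (loveNineLoop N c).2 else -1) =
    (if 9 * (if N % 10 ≠ 0 then 10 - N % 10 else 10) ≤ N
     then c + (if N % 10 ≠ 0 then 10 - N % 10 else 10) else -1) := by
  intro n
  induction n using Nat.strong_induction_on with
  | _ n ih =>
    intro N c hn hpos
    rw [loveNineLoop]
    simp only [hpos, dif_pos, pymod_eq]
    by_cases hb : (N - 9) % 10 = 0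
    · simp only [hb]
      have hd : N % 10 = 9 := by omega
      simp only [hd]
      norm_num
    · rw [if_neg hb]
      by_cases hp : 0 < N - 9
      · rw [ih (N - 9).toNat (by omega) (N - 9) (c + 1) rfl hp]
        have h1 : 0 ≤ N % 10 ∧ N % 10 < 10 := ⟨Int.emod_nonneg _ (by norm_num), Int.emod_lt_of_pos _ (by norm_num)⟩
        have h2 : (N - 9) % 10 = (N + 1) % 10 := by omega
        by_cases hd9 : N % 10 = 9
        · exfalso; omega
        · by_cases hd0 : N % 10 = 0
          · have : (N - 9) % 10 = 1 := by omega
            simp only [hd0, this]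
            norm_num
            omega
          · have h3 : (N - 9) % 10 = N % 10 + 1 := by omega
            rw [h3]
            split_ifs <;> omega
      · -- N - 9 ≤ 0 and not divisible: loop exits with negative value
        rw [loveNineLoop]
        rw [dif_neg (by omega)]
        have hneg : ¬ (0 ≤ N - 9) := by
          intro h
          have : N - 9 = 0 := by omega
          omega
        simp only [hneg, if_neg, not_false_iff]
        have h1 : 0 ≤ N % 10 ∧ N % 10 < 10 := ⟨Int.emod_nonneg _ (by norm_num), Int.emod_lt_of_pos _ (by norm_num)⟩
        split_ifs with g1 g2 <;> omega

-- ===== VERDICT (by name: the statement is the Claim_ definition above) =====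
theorem loveNine_spec : Claim_equal_loveNine := by
  intro N _
  simp only [Spec_loveNine, loveNine, loveNine_alt, pymod_eq]
  by_cases hpos : 0 < N
  · rw [if_neg (show ¬ N ≤ 0 by omega), loop_eval N.toNat N 0 rfl hpos]
    split_ifs <;> omega
  · rw [loveNineLoop, dif_neg hpos, if_pos (by omega : N ≤ 0)]
    split_ifs <;> omega
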